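-- pv_equiv track=rewrite | github.com/IOntUMAtIp/introducao-a-ciencia-da-computacao-com-python-parte-01 | semana 02 exercicio complementar 02.py | primeiro_lex
-- ===== SOURCE A (Python) =====
-- def primeiro_lex(lista):
--     ordem = lista[0]
--     primeira_letra = ord(str(lista[0])[0])
--     for i in lista:
--         frase = str(i)
--         letra = frase[0]
--         primeiro = ord(frase[0])
--         if primeiro < primeira_letra:
--             primeira_letra = primeiro
--             ordem = i
--     return ordem
-- ===== SOURCE B (Python) =====
-- def primeiro_lex(lista):
--     return sorted(lista, key=lambda x: ord(str(x)[0]))[0]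
-- ===== Notes on version B (the rewrite author's own statement) =====
-- stated objective: idiomatic
-- what changed: Replaces the explicit accumulator scan with sorted(lista, key=lambda x: ord(str(x)[0]))[0], relying on sort stability for the first-occurrence tie-break.
import Mathlib
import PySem

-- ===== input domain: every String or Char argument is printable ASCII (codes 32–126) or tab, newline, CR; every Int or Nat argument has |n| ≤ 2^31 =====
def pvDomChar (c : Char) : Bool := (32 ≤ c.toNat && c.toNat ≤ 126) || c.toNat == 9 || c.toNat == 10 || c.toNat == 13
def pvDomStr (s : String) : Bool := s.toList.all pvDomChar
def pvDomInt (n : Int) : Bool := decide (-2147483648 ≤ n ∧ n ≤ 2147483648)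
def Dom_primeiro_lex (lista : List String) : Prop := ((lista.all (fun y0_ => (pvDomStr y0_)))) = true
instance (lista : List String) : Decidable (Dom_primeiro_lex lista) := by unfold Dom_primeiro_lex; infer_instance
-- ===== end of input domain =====

-- B replaces A's accumulator scan by a stable sort on the first character's code and taking element [0] (idiomatic; same result by sort stability).

-- ===== PORT A =====
-- ord(str(i)[0]); on Pre_ every string is nonempty, so the .getD ' ' default is never used
def pvKeyA (s : String) : Int := (((PySem.Str.pyGet? s 0).getD ' ').toNat : Int)

def primeiro_lex (lista : List String) : String :=
  let ordem := (PySem.List.pyGet? lista 0).getD ""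
  let primeira_letra : Int := pvKeyA ordem
  (lista.foldl (fun (st : String × Int) i =>
      let frase := i
      let primeiro : Int := pvKeyA frase
      if primeiro < st.2 then (i, primeiro) else st) (ordem, primeira_letra)).1

-- ===== PORT B =====
-- key=lambda x: ord(str(x)[0])
def pvKeyB (s : String) : Int := (((PySem.Str.pyGet? s 0).getD ' ').toNat : Int)

def primeiro_lex_alt (lista : List String) : String :=
  (PySem.List.pyGet? (PySem.List.sorted lista pvKeyB false) 0).getD ""

-- ===== PRECONDITION & SPEC =====
-- Pre_ excludes exactly the inputs where Python A raises IndexError: the empty list (lista[0]) and lists containing an empty string (str(i)[0]).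
def Pre_primeiro_lex (lista : List String) : Prop := lista ≠ [] ∧ ∀ s ∈ lista, s ≠ ""
instance (lista : List String) : Decidable (Pre_primeiro_lex lista) := by unfold Pre_primeiro_lex; infer_instance
def pvWitness_primeiro_lex : List String := (["ba", "ab", "aa"])
def Spec_primeiro_lex (lista : List String) (out : String) : Prop := out = primeiro_lex_alt lista
instance (lista : List String) (out : String) : Decidable (Spec_primeiro_lex lista out) := by unfold Spec_primeiro_lex; infer_instance

-- ===== CLAIM (what is proved, stated in full; the proofs are below) =====
def Claim_equal_primeiro_lex : Prop := ∀ (lista : List String), Dom_primeiro_lex lista → Pre_primeiro_lex lista → Spec_primeiro_lex lista (primeiro_lex lista)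

-- ===== LEMMAS AND PROOFS =====

-- A's pair fold carries the invariant st.2 = key st.1; its first component is a running strict-< argmin.
theorem pair_foldl_eq_min_foldl (key : String → Int) :
    ∀ (xs : List String) (m : String),
      (xs.foldl (fun (st : String × Int) i =>
          if key i < st.2 then (i, key i) else st) (m, key m)).1
        = xs.foldl (fun (m : String) i => if key i < key m then i else m) m := by
  intro xs
  induction xs with
  | nil => intro m; rfl
  | cons x t ih =>
      intro m
      simp only [List.foldl]
      by_cases h : key x < key m
      · simp [h, ih]
      · simp [h, ih]

-- The head of insertion-sort's fold depends only on the head of the accumulator.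
theorem head_foldl_insertBy (key : String → Int) :
    ∀ (xs : List String) (a : String) (t : List String),
      (xs.foldl (fun acc x => PySem.List.insertBy (fun p q => decide (key p < key q)) x acc) (a :: t)).head?
        = some (xs.foldl (fun (m : String) i => if key i < key m then i else m) a) := by
  intro xs
  induction xs with
  | nil => intro a t; rfl
  | cons x r ih =>
      intro a t
      simp only [List.foldl]
      by_cases h : key x < key a
      · simp [PySem.List.insertBy, h, ih]
      · simp [PySem.List.insertBy, h, ih]

-- ===== VERDICT (by name: the statement is the Claim_ definition above) =====
theorem primeiro_lex_spec : Claim_equal_primeiro_lex := by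
  intro lista _hdom hpre
  obtain ⟨hne, -⟩ := hpre
  obtain ⟨h, t, rfl⟩ := List.exists_cons_of_ne_nil hne
  unfold Spec_primeiro_lex primeiro_lex primeiro_lex_alt
  have hget : PySem.List.pyGet? (h :: t) (0 : Int) = some h := by
    simp [PySem.List.pyGet?_natCast (h :: t) 0]
  -- B's side: the head of the stable sort is the running strict-< argmin
  have hB : (PySem.List.sorted (h :: t) pvKeyB false).head?
      = some (t.foldl (fun (m : String) i => if pvKeyB i < pvKeyB m then i else m) h) := by
    rw [PySem.List.sorted_eq_foldl_insertBy]
    simp only [List.foldl]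
    exact head_foldl_insertBy pvKeyB t h []
  obtain ⟨m, rest, hrest⟩ : ∃ m rest, PySem.List.sorted (h :: t) pvKeyB false = m :: rest := by
    cases hs : PySem.List.sorted (h :: t) pvKeyB false with
    | nil => rw [hs] at hB; simp at hB
    | cons a r => exact ⟨a, r, rfl⟩
  rw [hrest] at hB
  simp only [List.head?] at hB
  have hm : m = t.foldl (fun (m : String) i => if pvKeyB i < pvKeyB m then i else m) h :=
    Option.some.inj hB
  -- A's side: the first fold step leaves the state (h, key h) unchanged
  simp only [hget, Option.getD, hrest]
  have hA1 : (h :: t).foldl (fun (st : String × Int) i =>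
        if pvKeyA i < st.2 then (i, pvKeyA i) else st) (h, pvKeyA h)
      = t.foldl (fun (st : String × Int) i =>
        if pvKeyA i < st.2 then (i, pvKeyA i) else st) (h, pvKeyA h) := by
    simp [List.foldl]
  have hgetm : PySem.List.pyGet? (m :: rest) (0 : Int) = some m := by
    simp [PySem.List.pyGet?_natCast (m :: rest) 0]
  rw [hgetm]
  simp only [hA1, pair_foldl_eq_min_foldl pvKeyA t h, hm]
  rfl
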